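-- pv_equiv track=rewrite | github.com/ktakeda122/Text-Based-Asset-Pricing | run_full_pipeline.py | _parse_numbered_lines
-- ===== SOURCE A (Python) =====
-- def _parse_numbered_lines(text, expected_n):
--     lines = [l.strip() for l in text.strip().split("\n") if l.strip()]
--     cleaned = []
--     for line in lines:
--         for sep in ['. ', ') ', ': ']:
--             idx = line.find(sep)
--             if idx != -1 and line[:idx].strip().isdigit():
--                 line = line[idx + len(sep):]
--                 break
--         cleaned.append(line.strip())
--     if len(cleaned) == expected_n:
--         return cleaned
--     return None
-- ===== SOURCE B (Python) =====
-- DIGITS = "0123456789"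
--
-- def _parse_numbered_lines(text, expected_n):
--     cleaned = []
--     for raw in text.strip().split("\n"):
--         line = raw.strip()
--         if not line:
--             continue
--         rest = line.lstrip(DIGITS)
--         if len(rest) < len(line):
--             body = rest.lstrip()
--             if body[:1] in ('.', ')', ':') and body[1:2] == ' ':
--                 line = body[2:]
--         cleaned.append(line.strip())
--     if len(cleaned) == expected_n:
--         return cleaned
--     return None
-- ===== Notes on version B (the rewrite author's own statement) =====
-- stated objective: simpler
-- what changed: A runs str.find for each of three separators per line and tests the prefix before the hit with strip().isdigit(); B instead scans each line once from the left (lstrip the digit run, lstrip spaces, check the next two characters), with no substring search and no prefix re-validation.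
import Mathlib
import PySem

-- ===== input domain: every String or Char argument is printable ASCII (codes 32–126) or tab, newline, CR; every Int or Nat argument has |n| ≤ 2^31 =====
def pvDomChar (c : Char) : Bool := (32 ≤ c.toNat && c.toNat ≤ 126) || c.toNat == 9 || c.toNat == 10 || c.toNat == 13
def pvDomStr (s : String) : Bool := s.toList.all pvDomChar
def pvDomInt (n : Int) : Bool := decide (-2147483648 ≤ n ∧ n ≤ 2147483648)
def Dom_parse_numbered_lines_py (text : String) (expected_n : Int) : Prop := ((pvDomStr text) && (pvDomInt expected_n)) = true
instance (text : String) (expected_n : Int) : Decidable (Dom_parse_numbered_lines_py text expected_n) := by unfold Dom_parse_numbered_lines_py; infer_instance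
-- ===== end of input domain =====

-- B replaces A's per-separator substring search (find + strip + isdigit of the prefix, per line) by a single
-- left-to-right scan of each line: drop the leading digit run, drop the whitespace after it, and look at the
-- next two characters; objective: simpler.

-- ===== PORT A =====
def pvSepsA : List (List Char) := [['.', ' '], [')', ' '], [':', ' ']]

-- the "for sep in [...]: ... break" loop of A, one recursive call per separator
def pvALoop (line : List Char) : List (List Char) → List Char
  | [] => line
  | sep :: rest =>
    let idx := PySem.Chars.find line sep
    if idx ≠ -1 ∧ PySem.Chars.strIsdigit (PySem.Chars.strip (PySem.Chars.slice line none (some idx))) = true then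
      PySem.Chars.slice line (some (idx + (sep.length : Int))) none
    else
      pvALoop line rest

def parse_numbered_lines_py (text : String) (expected_n : Int) : Option (List String) :=
  let lines := ((PySem.Chars.splitOn (PySem.Chars.strip text.toList) ['\n']).filter
    (fun l => !(PySem.Chars.strip l).isEmpty)).map PySem.Chars.strip
  let cleaned := lines.map (fun line => PySem.Chars.strip (pvALoop line pvSepsA))
  if (cleaned.length : Int) = expected_n then some (cleaned.map (fun cs => String.ofList cs)) else none

-- ===== PORT B =====
def pvDigits : List Char := ['0', '1', '2', '3', '4', '5', '6', '7', '8', '9']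

-- line.lstrip(DIGITS) is ported by hand (PySem has no lstrip-with-chars): it drops exactly the longest
-- prefix of characters drawn from DIGITS, i.e. List.dropWhile of membership in DIGITS.
def pvBLine (line : List Char) : List Char :=
  let rest := line.dropWhile (fun c => pvDigits.contains c)
  if rest.length < line.length then
    let body := PySem.Chars.lstrip rest
    if (PySem.Chars.slice body none (some 1) = ['.'] ∨ PySem.Chars.slice body none (some 1) = [')'] ∨
        PySem.Chars.slice body none (some 1) = [':']) ∧ PySem.Chars.slice body (some 1) (some 2) = [' '] then
      PySem.Chars.slice body (some 2) none
    else line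
  else line

def parse_numbered_lines_py_alt (text : String) (expected_n : Int) : Option (List String) :=
  let cleaned := (PySem.Chars.splitOn (PySem.Chars.strip text.toList) ['\n']).foldl
    (fun acc raw =>
      let line := PySem.Chars.strip raw
      if line.isEmpty then acc else acc ++ [PySem.Chars.strip (pvBLine line)]) []
  if (cleaned.length : Int) = expected_n then some (cleaned.map (fun cs => String.ofList cs)) else none

-- ===== PRECONDITION & SPEC =====
def Spec_parse_numbered_lines_py (text : String) (expected_n : Int) (out : Option (List String)) : Prop := out = parse_numbered_lines_py_alt text expected_n
instance (text : String) (expected_n : Int) (out : Option (List String)) : Decidable (Spec_parse_numbered_lines_py text expected_n out) := by unfold Spec_parse_numbered_lines_py; infer_instance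

-- ===== CLAIM (what is proved, stated in full; the proofs are below) =====
def Claim_equal_parse_numbered_lines_py : Prop := ∀ (text : String) (expected_n : Int), Dom_parse_numbered_lines_py text expected_n → Spec_parse_numbered_lines_py text expected_n (parse_numbered_lines_py text expected_n)

-- ===== LEMMAS AND PROOFS =====

theorem pv_head_dropWhile {α : Type} (P : α → Bool) (l : List α) (a : α) (rest : List α)
    (h : l.dropWhile P = a :: rest) : P a = false := by
  induction l with
  | nil => simp at h
  | cons x xs ih =>
    by_cases hx : P x = true
    · rw [List.dropWhile_cons_of_pos hx] at h; exact ih h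
    · rw [List.dropWhile_cons_of_neg hx] at h
      cases h; simpa using hx
-- strip never leaves leading whitespace
theorem pv_lstrip_strip (s : List Char) :
    List.dropWhile PySem.Chars.isspace (PySem.Chars.strip s) = PySem.Chars.strip s := by
  unfold PySem.Chars.strip PySem.Chars.rstrip PySem.Chars.lstrip
  set u := List.dropWhile PySem.Chars.isspace s with hu
  set q := (List.dropWhile PySem.Chars.isspace u.reverse).reverse with hq
  rcases hq' : q with _ | ⟨a, q'⟩
  · simp
  have hpre : q <+: u := by
    rw [hq]
    have h := List.reverse_prefix.mpr (by simpa using List.dropWhile_suffix (l := u.reverse) PySem.Chars.isspace)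
    simpa using h
  obtain ⟨tail, htail⟩ := hpre
  rw [hq'] at htail
  have hcons : List.dropWhile PySem.Chars.isspace s = a :: (q' ++ tail) := by
    rw [← hu]; simpa using htail.symm
  have hPa := pv_head_dropWhile _ s a _ hcons
  rw [List.dropWhile_cons_of_neg (by simp [hPa])]

theorem pv_sep_char (c : Char) (hc : c ∈ ['.', ')', ':']) :
    PySem.Chars.isdigit c = false ∧ PySem.Chars.isspace c = false := by
  simp only [List.mem_cons, List.not_mem_nil, or_false] at hc
  rcases hc with h | h | h <;> subst h <;> exact ⟨by decide, by decide⟩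
theorem pv_digit_not_space (c : Char) (h : PySem.Chars.isdigit c = true) :
    PySem.Chars.isspace c = false := by
  simp only [PySem.Chars.isdigit, Bool.and_eq_true, decide_eq_true_eq, Char.le_def,
    UInt32.le_iff_toNat_le, show '0'.val.toNat = 48 from rfl, show '9'.val.toNat = 57 from rfl] at h
  simp only [PySem.Chars.isspace, Char.toNat, Bool.or_eq_false_iff, Bool.and_eq_false_iff,
    decide_eq_false_iff_not]
  omega
theorem pv_space_not_digit (c : Char) (h : PySem.Chars.isspace c = true) :
    PySem.Chars.isdigit c = false := by
  by_contra hd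
  rw [pv_digit_not_space c (by simpa using hd)] at h
  exact Bool.false_ne_true h
theorem pv_takeWhile_split {α : Type} (P : α → Bool) (a b : List α)
    (ha : ∀ x ∈ a, P x = true) (hb : ∀ x, b.head? = some x → P x = false) :
    (a ++ b).takeWhile P = a ∧ (a ++ b).dropWhile P = b := by
  have hta : a.takeWhile P = a := List.takeWhile_eq_self_iff.mpr ha
  have hda : a.dropWhile P = [] := by
    have := congrArg List.length (List.takeWhile_append_dropWhile (p := P) (l := a))
    rw [hta] at this; simp at this
    exact List.eq_nil_of_length_eq_zero (by simp at this ⊢; omega)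
  have htb : b.takeWhile P = [] := by
    cases b with
    | nil => simp
    | cons x xs => rw [List.takeWhile_cons_of_neg (by simp [hb x rfl])]
  have hdb : b.dropWhile P = b := by
    cases b with
    | nil => simp
    | cons x xs => rw [List.dropWhile_cons_of_neg (by simp [hb x rfl])]
  constructor
  · rw [List.takeWhile_append, hta]; simp [htb]
  · rw [List.dropWhile_append, hda]; simp [hdb]
theorem pv_rstrip_decomp (s : List Char) :
    ∃ w, s = PySem.Chars.rstrip s ++ w ∧ ∀ x ∈ w, PySem.Chars.isspace x = true := by
  refine ⟨(s.reverse.takeWhile PySem.Chars.isspace).reverse, ?_, ?_⟩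
  · unfold PySem.Chars.rstrip
    rw [← List.reverse_append, List.takeWhile_append_dropWhile, List.reverse_reverse]
  · intro x hx
    exact List.mem_takeWhile_imp (by simpa using hx)
theorem pv_rstrip_dw (d w : List Char) (hd : ∀ x ∈ d, PySem.Chars.isdigit x = true)
    (hw : ∀ x ∈ w, PySem.Chars.isspace x = true) : PySem.Chars.rstrip (d ++ w) = d := by
  unfold PySem.Chars.rstrip
  rw [List.reverse_append, List.dropWhile_append]
  have hw' : List.dropWhile PySem.Chars.isspace w.reverse = [] := by
    rw [List.dropWhile_eq_nil_iff]
    intro x hx; simpa using hw x (by simpa using hx)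
  have hd' : List.dropWhile PySem.Chars.isspace d.reverse = d.reverse := by
    rw [List.dropWhile_eq_self_iff]
    intro h0 hsp
    have hmem : d.reverse[0] ∈ d := by
      have := List.getElem_mem (l := d.reverse) (n := 0) h0
      simpa using this
    have := pv_digit_not_space _ (hd _ hmem)
    rw [this] at hsp; exact Bool.false_ne_true hsp
  simp [hw', hd']
theorem pv_find_at (d w t : List Char) (c : Char) (hc : c ∈ ['.', ')', ':'])
    (hd : ∀ x ∈ d, PySem.Chars.isdigit x = true) (hw : ∀ x ∈ w, PySem.Chars.isspace x = true) :
    PySem.Chars.find (d ++ w ++ c :: ' ' :: t) [c, ' '] = ((d.length + w.length : Nat) : Int) := by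
  set l := d ++ w ++ c :: ' ' :: t with hl
  set k := d.length + w.length with hk
  have hsplit : l = (d ++ w) ++ (c :: ' ' :: t) := by simp [hl]
  have hklen : k = (d ++ w).length := by simp [hk]
  have hdrop : l.drop k = c :: ' ' :: t := by rw [hsplit, hklen, List.drop_left]
  have hpre : [c, ' '] <+: l.drop k := ⟨t, by rw [hdrop]; rfl⟩
  have hmin : ∀ i < k, ¬ [c, ' '] <+: l.drop i := by
    rintro i hi ⟨u, hu2⟩
    have hgl : l[i]? = some c := by
      have h0 : (l.drop i)[0]? = some c := by rw [← hu2]; rfl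
      rw [List.getElem?_drop] at h0; simpa using h0
    have hik : i < (d ++ w).length := by rw [← hklen]; exact hi
    have hga : (d ++ w)[i]? = some c := by
      rw [hsplit, List.getElem?_append, if_pos hik] at hgl; exact hgl
    have hmem : c ∈ d ++ w := List.mem_of_getElem? hga
    rcases List.mem_append.mp hmem with h | h
    · exact absurd (hd c h) (by simp [(pv_sep_char c hc).1])
    · exact absurd (hw c h) (by simp [(pv_sep_char c hc).2])
  have hin : [c, ' '] <:+: l := hpre.isInfix.trans (List.drop_suffix k l).isInfix
  have hnn : 0 ≤ PySem.Chars.find l [c, ' '] := (PySem.Chars.find_nonneg_iff _ _).mpr hin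
  obtain ⟨hp, hmin'⟩ := PySem.Chars.find_spec hnn
  have hfk : (PySem.Chars.find l [c, ' ']).toNat = k := by
    rcases lt_trichotomy (PySem.Chars.find l [c, ' ']).toNat k with h | h | h
    · exact absurd hp (hmin _ h)
    · exact h
    · exact absurd hpre (hmin' k h)
  rw [← Int.toNat_of_nonneg hnn, hfk]

theorem pv_condA_iff (l : List Char) (hl : List.dropWhile PySem.Chars.isspace l = l)
    (c : Char) (hc : c ∈ ['.', ')', ':']) :
    (PySem.Chars.find l [c, ' '] ≠ -1 ∧
      PySem.Chars.strIsdigit (PySem.Chars.strip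
        (PySem.Chars.slice l none (some (PySem.Chars.find l [c, ' '])))) = true)
    ↔ (l.takeWhile PySem.Chars.isdigit ≠ [] ∧
       ∃ t, (l.dropWhile PySem.Chars.isdigit).dropWhile PySem.Chars.isspace = c :: ' ' :: t) := by
  constructor
  · rintro ⟨hne, hdig⟩
    have hnn : 0 ≤ PySem.Chars.find l [c, ' '] := by
      have := PySem.Chars.neg_one_le_find l [c, ' ']
      omega
    set k := (PySem.Chars.find l [c, ' ']).toNat with hkdef
    have hfind : PySem.Chars.find l [c, ' '] = (k : Int) := (Int.toNat_of_nonneg hnn).symm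
    have hslice : PySem.Chars.slice l none (some (PySem.Chars.find l [c, ' '])) = l.take k := by
      rw [hfind]; exact PySem.List.slice_to l (Int.natCast_nonneg _)
    rw [hslice] at hdig
    set p := l.take k with hp
    by_cases hpnil : p = []
    · rw [hpnil] at hdig
      simp [PySem.Chars.strip, PySem.Chars.rstrip, PySem.Chars.lstrip, PySem.Chars.strIsdigit] at hdig
    -- l is nonempty and starts with a non-space char
    obtain ⟨a, l', hlcons⟩ : ∃ a l', l = a :: l' := by
      cases hli : l with
      | nil => rw [hli] at hp; simp [hp] at hpnil
      | cons x xs => exact ⟨x, xs, rfl⟩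
    have hasp : PySem.Chars.isspace a = false :=
      pv_head_dropWhile _ l a l' (by rw [← hlcons]; rw [hlcons] at hl ⊢; exact hl)
    have hlstrip_p : List.dropWhile PySem.Chars.isspace p = p := by
      obtain ⟨kp, hkp⟩ : ∃ kp, k = kp + 1 := by
        rcases Nat.eq_zero_or_pos k with h | h
        · exfalso; rw [h] at hp; simp [hp] at hpnil
        · exact ⟨k - 1, by omega⟩
      rw [hp, hlcons, hkp, List.take_succ_cons, List.dropWhile_cons_of_neg (by simp [hasp])]
    have hstrip_p : PySem.Chars.strip p = PySem.Chars.rstrip p := by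
      unfold PySem.Chars.strip PySem.Chars.lstrip
      rw [hlstrip_p]
    rw [hstrip_p] at hdig
    obtain ⟨w', hw'eq, hw'sp⟩ := pv_rstrip_decomp p
    set q := PySem.Chars.rstrip p with hq
    have hqne : q ≠ [] ∧ ∀ x ∈ q, PySem.Chars.isdigit x = true := by
      constructor
      · intro h; rw [h] at hdig; simp [PySem.Chars.strIsdigit] at hdig
      · intro x hx
        simp [PySem.Chars.strIsdigit, List.all_eq_true] at hdig
        exact hdig.2 x hx
    obtain ⟨hp2, _⟩ := PySem.Chars.find_spec hnn
    obtain ⟨t0, ht0⟩ := hp2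
    have hdropk : l.drop k = c :: ' ' :: t0 := by rw [← ht0]; rfl
    have hldecomp : l = q ++ (w' ++ (c :: ' ' :: t0)) := by
      conv_lhs => rw [← List.take_append_drop k l]
      rw [hdropk, ← hp, hw'eq]
      simp
    have hsplit1 := pv_takeWhile_split PySem.Chars.isdigit q (w' ++ (c :: ' ' :: t0)) hqne.2
      (by
        intro x hx
        cases w' with
        | nil =>
          simp at hx
          rw [← hx]; exact (pv_sep_char c hc).1
        | cons y ys =>
          simp at hx
          rw [← hx]; exact pv_space_not_digit y (hw'sp y (by simp)))
    have hsplit2 := pv_takeWhile_split PySem.Chars.isspace w' (c :: ' ' :: t0) hw'sp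
      (by
        intro x hx
        simp at hx
        rw [← hx]; exact (pv_sep_char c hc).2)
    rw [hldecomp]
    refine ⟨by rw [hsplit1.1]; exact hqne.1, t0, ?_⟩
    rw [hsplit1.2, hsplit2.2]
  · rintro ⟨hne, t, ht⟩
    set d := l.takeWhile PySem.Chars.isdigit with hd
    set r := l.dropWhile PySem.Chars.isdigit with hr
    set w := r.takeWhile PySem.Chars.isspace with hw
    have hldecomp : l = d ++ w ++ c :: ' ' :: t := by
      conv_lhs => rw [← List.takeWhile_append_dropWhile (p := PySem.Chars.isdigit) (l := l)]
      rw [← hd, ← hr]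
      conv_lhs => rw [← List.takeWhile_append_dropWhile (p := PySem.Chars.isspace) (l := r)]
      rw [← hw, ht]
      simp
    have hdall : ∀ x ∈ d, PySem.Chars.isdigit x = true := fun x hx => List.mem_takeWhile_imp hx
    have hwall : ∀ x ∈ w, PySem.Chars.isspace x = true := fun x hx => List.mem_takeWhile_imp hx
    have hfind : PySem.Chars.find l [c, ' '] = ((d.length + w.length : Nat) : Int) := by
      rw [hldecomp]; exact pv_find_at d w t c hc hdall hwall
    refine ⟨by rw [hfind]; omega, ?_⟩
    have hslice : PySem.Chars.slice l none (some (PySem.Chars.find l [c, ' '])) = d ++ w := by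
      rw [hfind, PySem.Chars.slice_eq_listSlice, PySem.List.slice_to l (Int.natCast_nonneg _)]
      rw [hldecomp]
      have : ((d.length + w.length : Nat) : Int).toNat = (d ++ w).length := by simp; omega
      rw [this, show d ++ w ++ c :: ' ' :: t = (d ++ w) ++ (c :: ' ' :: t) by simp, List.take_left]
    rw [hslice]
    obtain ⟨a, d', hdcons⟩ : ∃ a d', d = a :: d' := by
      cases hdc : d with
      | nil => exact absurd hdc hne
      | cons x xs => exact ⟨x, xs, rfl⟩
    have hstrip : PySem.Chars.strip (d ++ w) = d := by
      unfold PySem.Chars.strip PySem.Chars.lstrip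
      rw [hdcons, List.cons_append,
        List.dropWhile_cons_of_neg (by simp [pv_digit_not_space a (hdall a (by rw [hdcons]; simp))]),
        ← List.cons_append, ← hdcons]
      exact pv_rstrip_dw d w hdall hwall
    rw [hstrip]
    unfold PySem.Chars.strIsdigit
    rw [Bool.and_eq_true, List.all_eq_true]
    exact ⟨by simp [hdcons], hdall⟩

theorem pv_contains_digit (c : Char) : pvDigits.contains c = PySem.Chars.isdigit c := by
  rw [Bool.eq_iff_iff]
  simp only [pvDigits, PySem.Chars.isdigit, List.contains_eq_mem, List.mem_cons, List.not_mem_nil,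
    or_false, Char.le_def, Char.ext_iff, decide_eq_true_eq, Bool.and_eq_true,
    UInt32.le_iff_toNat_le, UInt32.ext_iff,
    show '0'.val.toNat = 48 from rfl, show '1'.val.toNat = 49 from rfl, show '2'.val.toNat = 50 from rfl,
    show '3'.val.toNat = 51 from rfl, show '4'.val.toNat = 52 from rfl, show '5'.val.toNat = 53 from rfl,
    show '6'.val.toNat = 54 from rfl, show '7'.val.toNat = 55 from rfl, show '8'.val.toNat = 56 from rfl,
    show '9'.val.toNat = 57 from rfl]
  omega

theorem pv_take_one {α : Type} (xs : List α) (a : α) (h : List.take 1 xs = [a]) :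
    ∃ xs', xs = a :: xs' := by
  cases xs with
  | nil => simp at h
  | cons x xs' => simp at h; exact ⟨xs', by rw [h]⟩

-- B evaluated on a matching line
theorem pvB_match (l : List Char) (c : Char) (t : List Char)
    (hc : c ∈ ['.', ')', ':'])
    (hne : l.takeWhile PySem.Chars.isdigit ≠ [])
    (ht : (l.dropWhile PySem.Chars.isdigit).dropWhile PySem.Chars.isspace = c :: ' ' :: t) :
    pvBLine l = t := by
  unfold pvBLine
  rw [funext pv_contains_digit]
  have hlr : l = l.takeWhile PySem.Chars.isdigit ++ l.dropWhile PySem.Chars.isdigit :=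
    (List.takeWhile_append_dropWhile).symm
  have hlen : (l.dropWhile PySem.Chars.isdigit).length < l.length := by
    conv_rhs => rw [hlr]
    rw [List.length_append]
    have : 0 < (l.takeWhile PySem.Chars.isdigit).length := List.length_pos_iff.mpr hne
    omega
  rw [if_pos hlen]
  rw [show PySem.Chars.lstrip = List.dropWhile PySem.Chars.isspace from rfl, ht]
  dsimp only
  have h1 : PySem.Chars.slice (c :: ' ' :: t) none (some 1) = [c] := by
    rw [PySem.Chars.slice_eq_listSlice, show (1 : Int) = ((1 : Nat) : Int) from rfl,
      PySem.List.slice_to _ (Int.natCast_nonneg _)]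
    rfl
  have h2 : PySem.Chars.slice (c :: ' ' :: t) (some 1) (some 2) = [' '] := by
    rw [PySem.Chars.slice_eq_listSlice, show (1 : Int) = ((1 : Nat) : Int) from rfl,
      show (2 : Int) = ((2 : Nat) : Int) from rfl, PySem.List.slice_natCast]
    rfl
  have h3 : PySem.Chars.slice (c :: ' ' :: t) (some 2) none = t := by
    rw [PySem.Chars.slice_eq_listSlice, show (2 : Int) = ((2 : Nat) : Int) from rfl,
      PySem.List.slice_from _ (Int.natCast_nonneg _)]
    rfl
  rw [h1, h2, h3]
  rw [if_pos]
  constructor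
  · simp only [List.mem_cons, List.not_mem_nil, or_false] at hc
    rcases hc with h | h | h <;> subst h <;> simp
  · rfl

-- B evaluated on a non-matching line
theorem pvB_nomatch (l : List Char)
    (hnm : ¬ (l.takeWhile PySem.Chars.isdigit ≠ [] ∧ ∃ c t, c ∈ (['.', ')', ':'] : List Char) ∧
      (l.dropWhile PySem.Chars.isdigit).dropWhile PySem.Chars.isspace = c :: ' ' :: t)) :
    pvBLine l = l := by
  unfold pvBLine
  rw [funext pv_contains_digit]
  by_cases hd : l.takeWhile PySem.Chars.isdigit = []
  · have : l.dropWhile PySem.Chars.isdigit = l := by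
      conv_rhs => rw [← List.takeWhile_append_dropWhile (p := PySem.Chars.isdigit) (l := l)]
      rw [hd]; rfl
    rw [this, if_neg (by omega)]
  · have hlr : l = l.takeWhile PySem.Chars.isdigit ++ l.dropWhile PySem.Chars.isdigit :=
      (List.takeWhile_append_dropWhile).symm
    have hlen : (l.dropWhile PySem.Chars.isdigit).length < l.length := by
      conv_rhs => rw [hlr]
      rw [List.length_append]
      have : 0 < (l.takeWhile PySem.Chars.isdigit).length := List.length_pos_iff.mpr hd
      omega
    rw [show PySem.Chars.lstrip = List.dropWhile PySem.Chars.isspace from rfl, if_pos hlen, if_neg]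
    rintro ⟨hsel, hsp⟩
    set body := List.dropWhile PySem.Chars.isspace (l.dropWhile PySem.Chars.isdigit) with hbody
    have hsel' : ∃ c, c ∈ (['.', ')', ':'] : List Char) ∧ PySem.Chars.slice body none (some 1) = [c] := by
      rcases hsel with h | h | h
      · exact ⟨'.', by simp, h⟩
      · exact ⟨')', by simp, h⟩
      · exact ⟨':', by simp, h⟩
    obtain ⟨c, hcmem, hc1⟩ := hsel'
    rw [PySem.Chars.slice_eq_listSlice, show (1 : Int) = ((1 : Nat) : Int) from rfl,
      PySem.List.slice_to _ (Int.natCast_nonneg _)] at hc1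
    obtain ⟨b1, hb1⟩ := pv_take_one body c (by simpa using hc1)
    rw [PySem.Chars.slice_eq_listSlice, show (1 : Int) = ((1 : Nat) : Int) from rfl,
      show (2 : Int) = ((2 : Nat) : Int) from rfl, PySem.List.slice_natCast] at hsp
    rw [hb1] at hsp
    obtain ⟨b2, hb2⟩ := pv_take_one b1 ' ' (by simpa using hsp)
    exact hnm ⟨hd, c, b2, hcmem, by rw [hb2] at hb1; rw [← hb1]⟩

theorem pvA_step (l sep : List Char) (rest : List (List Char)) :
    pvALoop l (sep :: rest) =
      if PySem.Chars.find l sep ≠ -1 ∧ PySem.Chars.strIsdigit (PySem.Chars.strip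
          (PySem.Chars.slice l none (some (PySem.Chars.find l sep)))) = true then
        PySem.Chars.slice l (some (PySem.Chars.find l sep + (sep.length : Int))) none
      else pvALoop l rest := rfl

theorem pvA_nomatch (l : List Char) (hl : List.dropWhile PySem.Chars.isspace l = l)
    (hnm : ¬ (l.takeWhile PySem.Chars.isdigit ≠ [] ∧ ∃ c t, c ∈ (['.', ')', ':'] : List Char) ∧
      (l.dropWhile PySem.Chars.isdigit).dropWhile PySem.Chars.isspace = c :: ' ' :: t)) :
    pvALoop l pvSepsA = l := by
  have hC : ∀ c, c ∈ (['.', ')', ':'] : List Char) →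
      ¬ (PySem.Chars.find l [c, ' '] ≠ -1 ∧ PySem.Chars.strIsdigit (PySem.Chars.strip
          (PySem.Chars.slice l none (some (PySem.Chars.find l [c, ' '])))) = true) := by
    intro c hc h
    obtain ⟨h1, t', ht'⟩ := (pv_condA_iff l hl c hc).mp h
    exact hnm ⟨h1, c, t', hc, ht'⟩
  show pvALoop l (['.', ' '] :: [')', ' '] :: [':', ' '] :: []) = l
  rw [pvA_step, if_neg (hC '.' (by simp)), pvA_step, if_neg (hC ')' (by simp)),
    pvA_step, if_neg (hC ':' (by simp))]
  rfl

theorem pvA_result (l : List Char) (c : Char) (t : List Char) (hc : c ∈ ['.', ')', ':'])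
    (ht : (l.dropWhile PySem.Chars.isdigit).dropWhile PySem.Chars.isspace = c :: ' ' :: t) :
    PySem.Chars.slice l (some (PySem.Chars.find l [c, ' '] + (([c, ' '] : List Char).length : Int))) none = t := by
  set d := l.takeWhile PySem.Chars.isdigit with hd
  set r := l.dropWhile PySem.Chars.isdigit with hr
  set w := r.takeWhile PySem.Chars.isspace with hw
  have hldecomp : l = d ++ w ++ c :: ' ' :: t := by
    conv_lhs => rw [← List.takeWhile_append_dropWhile (p := PySem.Chars.isdigit) (l := l)]
    rw [← hd, ← hr]
    conv_lhs => rw [← List.takeWhile_append_dropWhile (p := PySem.Chars.isspace) (l := r)]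
    rw [← hw, ht]
    simp
  have hdall : ∀ x ∈ d, PySem.Chars.isdigit x = true := fun x hx => List.mem_takeWhile_imp hx
  have hwall : ∀ x ∈ w, PySem.Chars.isspace x = true := fun x hx => List.mem_takeWhile_imp hx
  have hfind : PySem.Chars.find l [c, ' '] = ((d.length + w.length : Nat) : Int) := by
    rw [hldecomp]; exact pv_find_at d w t c hc hdall hwall
  have harg : PySem.Chars.find l [c, ' '] + (([c, ' '] : List Char).length : Int)
      = ((d.length + w.length + 2 : Nat) : Int) := by
    rw [hfind]; push_cast; norm_num
  rw [harg, PySem.Chars.slice_eq_listSlice, PySem.List.slice_from _ (Int.natCast_nonneg _)]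
  have hlen : ((d.length + w.length + 2 : Nat) : Int).toNat = (d ++ w ++ [c, ' ']).length := by
    simp; omega
  rw [hlen, hldecomp, show d ++ w ++ c :: ' ' :: t = (d ++ w ++ [c, ' ']) ++ t by simp,
    List.drop_left]

theorem pvA_match (l : List Char) (hl : List.dropWhile PySem.Chars.isspace l = l)
    (c : Char) (t : List Char) (hc : c ∈ ['.', ')', ':'])
    (hne : l.takeWhile PySem.Chars.isdigit ≠ [])
    (ht : (l.dropWhile PySem.Chars.isdigit).dropWhile PySem.Chars.isspace = c :: ' ' :: t) :
    pvALoop l pvSepsA = t := by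
  have hCtrue : (PySem.Chars.find l [c, ' '] ≠ -1 ∧ PySem.Chars.strIsdigit (PySem.Chars.strip
      (PySem.Chars.slice l none (some (PySem.Chars.find l [c, ' '])))) = true) :=
    (pv_condA_iff l hl c hc).mpr ⟨hne, t, ht⟩
  have hCfalse : ∀ c0, c0 ∈ (['.', ')', ':'] : List Char) → c0 ≠ c →
      ¬ (PySem.Chars.find l [c0, ' '] ≠ -1 ∧ PySem.Chars.strIsdigit (PySem.Chars.strip
          (PySem.Chars.slice l none (some (PySem.Chars.find l [c0, ' '])))) = true) := by
    intro c0 hc0 hne0 h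
    obtain ⟨_, t', ht'⟩ := (pv_condA_iff l hl c0 hc0).mp h
    rw [ht] at ht'
    exact hne0 (List.cons.injEq .. ▸ ht').1.symm
  show pvALoop l (['.', ' '] :: [')', ' '] :: [':', ' '] :: []) = t
  simp only [List.mem_cons, List.not_mem_nil, or_false] at hc
  rcases hc with h | h | h <;> subst h
  · rw [pvA_step, if_pos hCtrue]
    exact pvA_result l '.' t (by simp) ht
  · rw [pvA_step, if_neg (hCfalse '.' (by simp) (by decide)), pvA_step, if_pos hCtrue]
    exact pvA_result l ')' t (by simp) ht
  · rw [pvA_step, if_neg (hCfalse '.' (by simp) (by decide)),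
      pvA_step, if_neg (hCfalse ')' (by simp) (by decide)), pvA_step, if_pos hCtrue]
    exact pvA_result l ':' t (by simp) ht

theorem pv_line_eq (l : List Char) (hl : List.dropWhile PySem.Chars.isspace l = l) :
    pvALoop l pvSepsA = pvBLine l := by
  by_cases hm : l.takeWhile PySem.Chars.isdigit ≠ [] ∧ ∃ c t, c ∈ (['.', ')', ':'] : List Char) ∧
      (l.dropWhile PySem.Chars.isdigit).dropWhile PySem.Chars.isspace = c :: ' ' :: t
  · obtain ⟨hne, c, t, hcmem, ht⟩ := hm
    rw [pvA_match l hl c t hcmem hne ht, pvB_match l c t hcmem hne ht]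
  · rw [pvA_nomatch l hl hm, pvB_nomatch l hm]

-- B's fold builds exactly A's filtered-and-mapped cleaned list
theorem pv_fold_eq (ls : List (List Char)) (acc : List (List Char)) :
    ls.foldl (fun acc raw =>
      let line := PySem.Chars.strip raw
      if line.isEmpty then acc else acc ++ [PySem.Chars.strip (pvBLine line)]) acc
    = acc ++ ((ls.filter (fun l => !(PySem.Chars.strip l).isEmpty)).map PySem.Chars.strip).map
        (fun line => PySem.Chars.strip (pvALoop line pvSepsA)) := by
  induction ls generalizing acc with
  | nil => simp
  | cons raw rest ih =>
    rw [List.foldl_cons, ih]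
    by_cases h : (PySem.Chars.strip raw).isEmpty = true
    · simp [h]
    · simp [h, pv_line_eq (PySem.Chars.strip raw) (pv_lstrip_strip raw)]

-- ===== VERDICT (by name: the statement is the Claim_ definition above) =====
theorem parse_numbered_lines_py_spec : Claim_equal_parse_numbered_lines_py := by
  intro text expected_n _
  unfold Spec_parse_numbered_lines_py parse_numbered_lines_py parse_numbered_lines_py_alt
  rw [pv_fold_eq, List.nil_append]
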